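-- pv_equiv track=rewrite | github.com/scfengv/codewars-Python | 7kyu/Shortest Word.py | find_short
-- ===== SOURCE A (Python) =====
-- def find_short(s):
--     sh = None
--     ss = s.split()
--     for i in ss:
--         l = len(i)
--         if sh == None or l <= sh:
--             sh = l
--     return sh
-- ===== SOURCE B (Python) =====
-- def find_short(s):
--     words = sorted(s.split(), key=len)
--     return len(words[0]) if words else None
-- ===== Notes on version B (the rewrite author's own statement) =====
-- stated objective: alternative
-- what changed: Replaces the linear min-tracking loop over the words with a sort-by-length followed by taking the first element.
-- outside the precondition, e.g. on find_short('  '): A returns None, B returns None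
import Mathlib
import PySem

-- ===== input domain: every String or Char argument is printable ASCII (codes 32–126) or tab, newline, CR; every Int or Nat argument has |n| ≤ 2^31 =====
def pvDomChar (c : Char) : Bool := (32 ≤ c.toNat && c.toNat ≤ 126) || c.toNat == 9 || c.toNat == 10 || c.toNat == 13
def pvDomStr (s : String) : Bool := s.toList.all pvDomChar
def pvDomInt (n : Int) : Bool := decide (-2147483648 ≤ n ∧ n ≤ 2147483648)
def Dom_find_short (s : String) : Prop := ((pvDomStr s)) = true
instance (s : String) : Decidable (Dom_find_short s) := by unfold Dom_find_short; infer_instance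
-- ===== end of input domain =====

-- B replaces A's linear min-tracking loop with sort-by-length then first element (alternative decomposition).

-- ===== PORT A =====
-- A's loop: sh starts as None; for each word, if sh is None or len ≤ sh, sh := len.
def find_short_step (sh : Option Int) (w : String) : Option Int :=
  match sh with
  | none => some (PySem.Str.len w)
  | some v => if PySem.Str.len w ≤ v then some (PySem.Str.len w) else some v

def find_short (s : String) : Int :=
  ((PySem.Str.split₀ s).foldl find_short_step none).getD 0

-- ===== PORT B =====
def find_short_alt (s : String) : Int :=
  match PySem.List.sorted (PySem.Str.split₀ s) (fun w => PySem.Str.len w) false with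
  | [] => 0
  | w :: _ => PySem.Str.len w

-- ===== PRECONDITION & SPEC =====
-- Pre_ excludes strings with no words (s.split() == []), where A returns None, not an int.
def Pre_find_short (s : String) : Prop := PySem.Str.split₀ s ≠ []
instance (s : String) : Decidable (Pre_find_short s) := by unfold Pre_find_short; infer_instance
def pvWitness_find_short : String := "a bb c"

def Spec_find_short (s : String) (out : Int) : Prop := out = find_short_alt s
instance (s : String) (out : Int) : Decidable (Spec_find_short s out) := by unfold Spec_find_short; infer_instance

-- ===== CLAIM (what is proved, stated in full; the proofs are below) =====
def Claim_equal_find_short : Prop := ∀ (s : String), Dom_find_short s → Pre_find_short s → Spec_find_short s (find_short s)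

-- ===== LEMMAS AND PROOFS =====

lemma fold_some (t : List String) (v : Int) :
    t.foldl find_short_step (some v) = some (t.foldl (fun a w => min a (PySem.Str.len w)) v) := by
  induction t generalizing v with
  | nil => rfl
  | cons w t ih =>
    simp only [List.foldl_cons, find_short_step]
    have hm : (if PySem.Str.len w ≤ v then some (PySem.Str.len w) else some v)
        = some (min v (PySem.Str.len w)) := by
      split_ifs with h <;> (congr 1; omega)
    rw [hm, ih]

lemma foldl_min_le_init (t : List String) (v : Int) :
    t.foldl (fun a w => min a (PySem.Str.len w)) v ≤ v := by
  induction t generalizing v with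
  | nil => simp
  | cons u t ih =>
    simp only [List.foldl_cons]
    calc _ ≤ min v (PySem.Str.len u) := ih _
         _ ≤ v := by omega

lemma foldl_min_le (t : List String) (v : Int) :
    ∀ y ∈ t, t.foldl (fun a w => min a (PySem.Str.len w)) v ≤ PySem.Str.len y := by
  induction t generalizing v with
  | nil => simp
  | cons w t ih =>
    intro y hy
    simp only [List.foldl_cons]
    rcases List.mem_cons.mp hy with hy | hy
    · subst hy
      calc _ ≤ min v (PySem.Str.len y) := foldl_min_le_init t _
           _ ≤ PySem.Str.len y := by omega
    · exact ih (min v (PySem.Str.len w)) y hy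

lemma foldl_min_mem (t : List String) (w : String) :
    ∃ x ∈ w :: t, t.foldl (fun a u => min a (PySem.Str.len u)) (PySem.Str.len w) = PySem.Str.len x := by
  induction t generalizing w with
  | nil => exact ⟨w, by simp⟩
  | cons u t ih =>
    simp only [List.foldl_cons]
    by_cases h : PySem.Str.len u ≤ PySem.Str.len w
    · have hm : min (PySem.Str.len w) (PySem.Str.len u) = PySem.Str.len u := by omega
      rw [hm]
      obtain ⟨x, hx, he⟩ := ih u
      refine ⟨x, ?_, he⟩
      rcases List.mem_cons.mp hx with h1 | h1 <;> simp [h1, List.mem_cons]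
    · have hm : min (PySem.Str.len w) (PySem.Str.len u) = PySem.Str.len w := by omega
      rw [hm]
      obtain ⟨x, hx, he⟩ := ih w
      refine ⟨x, ?_, he⟩
      rcases List.mem_cons.mp hx with h1 | h1 <;> simp [h1, List.mem_cons]

-- ===== VERDICT (by name: the statement is the Claim_ definition above) =====
theorem find_short_spec : Claim_equal_find_short := by
  intro s _ hpre
  unfold Spec_find_short find_short find_short_alt
  unfold Pre_find_short at hpre
  obtain ⟨w, t, hwt⟩ : ∃ w t, PySem.Str.split₀ s = w :: t := by
    cases hws : PySem.Str.split₀ s with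
    | nil => exact absurd hws hpre
    | cons a b => exact ⟨a, b, rfl⟩
  rw [hwt]
  obtain ⟨m, mt, hm⟩ : ∃ m mt, PySem.List.sorted (w :: t) (fun u => PySem.Str.len u) false = m :: mt := by
    cases hs : PySem.List.sorted (w :: t) (fun u => PySem.Str.len u) false with
    | nil =>
      have := (PySem.List.sorted_eq_nil_iff (w :: t) (fun u => PySem.Str.len u) false).mp hs
      simp at this
    | cons a b => exact ⟨a, b, rfl⟩
  rw [hm]
  simp only [List.foldl_cons, find_short_step, fold_some, Option.getD_some]
  have hmem : m ∈ w :: t := by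
    have hperm := PySem.List.sorted_perm (w :: t) (fun u => PySem.Str.len u) false
    exact hperm.mem_iff.mp (by rw [hm]; simp)
  have h1 : t.foldl (fun a u => min a (PySem.Str.len u)) (PySem.Str.len w) ≤ PySem.Str.len m := by
    rcases List.mem_cons.mp hmem with h | h
    · rw [← h]; exact foldl_min_le_init t _
    · exact foldl_min_le t _ m h
  obtain ⟨x, hx, hxe⟩ := foldl_min_mem t w
  have h2 : PySem.Str.len m ≤ t.foldl (fun a u => min a (PySem.Str.len u)) (PySem.Str.len w) := by
    rw [hxe]
    exact PySem.List.key_head_sorted_le (w :: t) (fun u => PySem.Str.len u) hm x hx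
  omega
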